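-- pv_equiv track=rewrite | github.com/hewzhew/sts-sim | tools/learning/train_combat_ppo.py | action_behavior_flags
-- ===== SOURCE A (Python) =====
-- SETUP_CARD_NAMES = {"Flex", "Rage", "Inflame", "Fire Breathing", "Dark Embrace", "Battle Trance"}
--
-- SURVIVAL_CARD_NAMES = {"Defend", "Power Through", "Impervious", "Shrug It Off", "Ghostly Armor", "True Grit"}
--
-- STATUS_ENGINE_CARD_NAMES = {"Second Wind", "Fire Breathing", "Dark Embrace", "Evolve"}
--
-- def action_behavior_flags(action_label: str) -> dict[str, bool]:
--     label = str(action_label or "")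
--     return {
--         "is_end_turn": label == "EndTurn",
--         "is_defend": "Defend" in label or "Impervious" in label or "Power Through" in label,
--         "is_potion": label.startswith("UsePotion"),
--         "is_setup": any(name in label for name in SETUP_CARD_NAMES),
--         "is_survival": any(name in label for name in SURVIVAL_CARD_NAMES),
--         "is_status_engine": any(name in label for name in STATUS_ENGINE_CARD_NAMES),
--         "is_attack_like": (
--             label.startswith("Play #")
--             and not any(name in label for name in SETUP_CARD_NAMES | SURVIVAL_CARD_NAMES | STATUS_ENGINE_CARD_NAMES)
--             and "Defend" not in label
--         ),
--     }
-- ===== SOURCE B (Python) =====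
-- SETUP_CARD_NAMES = {"Flex", "Rage", "Inflame", "Fire Breathing", "Dark Embrace", "Battle Trance"}
--
-- SURVIVAL_CARD_NAMES = {"Defend", "Power Through", "Impervious", "Shrug It Off", "Ghostly Armor", "True Grit"}
--
-- STATUS_ENGINE_CARD_NAMES = {"Second Wind", "Fire Breathing", "Dark Embrace", "Evolve"}
--
-- _DEFEND_NAMES = {"Defend", "Impervious", "Power Through"}
--
-- _ALL_NAMES = SETUP_CARD_NAMES | SURVIVAL_CARD_NAMES | STATUS_ENGINE_CARD_NAMES | _DEFEND_NAMES
--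
--
-- def action_behavior_flags(action_label: str) -> dict[str, bool]:
--     label = str(action_label or "")
--     # one scan over the universe of names, then set intersections per flag
--     matched = {name for name in _ALL_NAMES if name in label}
--     card_like = SETUP_CARD_NAMES | SURVIVAL_CARD_NAMES | STATUS_ENGINE_CARD_NAMES
--     return {
--         "is_end_turn": label == "EndTurn",
--         "is_defend": bool(matched & _DEFEND_NAMES),
--         "is_potion": label.startswith("UsePotion"),
--         "is_setup": bool(matched & SETUP_CARD_NAMES),
--         "is_survival": bool(matched & SURVIVAL_CARD_NAMES),
--         "is_status_engine": bool(matched & STATUS_ENGINE_CARD_NAMES),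
--         "is_attack_like": (
--             label.startswith("Play #")
--             and not (matched & card_like)
--             and "Defend" not in label
--         ),
--     }
-- ===== Notes on version B (the rewrite author's own statement) =====
-- stated objective: alternative
-- what changed: Instead of seven independent substring scans, B builds once the set of card names matched in the label and derives the setup/survival/status/defend flags from it by set intersections.
import Mathlib
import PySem

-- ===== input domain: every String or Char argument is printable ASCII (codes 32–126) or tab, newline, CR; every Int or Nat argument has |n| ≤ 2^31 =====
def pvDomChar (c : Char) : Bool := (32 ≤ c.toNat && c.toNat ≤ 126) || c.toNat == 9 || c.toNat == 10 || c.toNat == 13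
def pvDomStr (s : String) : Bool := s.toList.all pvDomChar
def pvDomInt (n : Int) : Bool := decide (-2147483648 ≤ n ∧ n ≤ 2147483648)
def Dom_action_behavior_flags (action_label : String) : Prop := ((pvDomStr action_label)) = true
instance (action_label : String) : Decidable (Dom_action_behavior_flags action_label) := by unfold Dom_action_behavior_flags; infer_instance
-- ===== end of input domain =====

-- B re-implements the flag classification as ONE scan building the set of matched card names,
-- with each flag read off by a set intersection (objective: alternative decomposition, not speed).

-- ===== PORT A =====
def pvSetupA : PySem.Set String :=
  PySem.Set.ofList ["Flex", "Rage", "Inflame", "Fire Breathing", "Dark Embrace", "Battle Trance"]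
def pvSurvivalA : PySem.Set String :=
  PySem.Set.ofList ["Defend", "Power Through", "Impervious", "Shrug It Off", "Ghostly Armor", "True Grit"]
def pvStatusA : PySem.Set String :=
  PySem.Set.ofList ["Second Wind", "Fire Breathing", "Dark Embrace", "Evolve"]

def action_behavior_flags (action_label : String) : List (String × Bool) :=
  let label := if action_label == "" then "" else action_label   -- str(action_label or "")
  [ ("is_end_turn", label == "EndTurn"),
    ("is_defend", PySem.Str.isIn "Defend" label || PySem.Str.isIn "Impervious" label
                    || PySem.Str.isIn "Power Through" label),
    ("is_potion", PySem.Str.startswith label "UsePotion"),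
    ("is_setup", pvSetupA.any (fun name => PySem.Str.isIn name label)),
    ("is_survival", pvSurvivalA.any (fun name => PySem.Str.isIn name label)),
    ("is_status_engine", pvStatusA.any (fun name => PySem.Str.isIn name label)),
    ("is_attack_like",
      PySem.Str.startswith label "Play #"
        && !((PySem.Set.union (PySem.Set.union pvSetupA pvSurvivalA) pvStatusA).any
              (fun name => PySem.Str.isIn name label))
        && !(PySem.Str.isIn "Defend" label)) ]

-- ===== PORT B =====
def pvSetupB : PySem.Set String :=
  PySem.Set.ofList ["Flex", "Rage", "Inflame", "Fire Breathing", "Dark Embrace", "Battle Trance"]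
def pvSurvivalB : PySem.Set String :=
  PySem.Set.ofList ["Defend", "Power Through", "Impervious", "Shrug It Off", "Ghostly Armor", "True Grit"]
def pvStatusB : PySem.Set String :=
  PySem.Set.ofList ["Second Wind", "Fire Breathing", "Dark Embrace", "Evolve"]
def pvDefendB : PySem.Set String :=
  PySem.Set.ofList ["Defend", "Impervious", "Power Through"]
def pvAllB : PySem.Set String :=
  PySem.Set.union (PySem.Set.union (PySem.Set.union pvSetupB pvSurvivalB) pvStatusB) pvDefendB

def action_behavior_flags_alt (action_label : String) : List (String × Bool) :=
  let label := if action_label == "" then "" else action_label   -- str(action_label or "")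
  let matched : PySem.Set String := pvAllB.filter (fun name => PySem.Str.isIn name label)
  let cardLike : PySem.Set String := PySem.Set.union (PySem.Set.union pvSetupB pvSurvivalB) pvStatusB
  [ ("is_end_turn", label == "EndTurn"),
    ("is_defend", !(PySem.Set.inter matched pvDefendB).isEmpty),
    ("is_potion", PySem.Str.startswith label "UsePotion"),
    ("is_setup", !(PySem.Set.inter matched pvSetupB).isEmpty),
    ("is_survival", !(PySem.Set.inter matched pvSurvivalB).isEmpty),
    ("is_status_engine", !(PySem.Set.inter matched pvStatusB).isEmpty),
    ("is_attack_like",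
      PySem.Str.startswith label "Play #"
        && (PySem.Set.inter matched cardLike).isEmpty
        && !(PySem.Str.isIn "Defend" label)) ]

-- ===== PRECONDITION & SPEC =====
def Spec_action_behavior_flags (action_label : String) (out : List (String × Bool)) : Prop := out = action_behavior_flags_alt action_label
instance (action_label : String) (out : List (String × Bool)) : Decidable (Spec_action_behavior_flags action_label out) := by unfold Spec_action_behavior_flags; infer_instance

-- ===== CLAIM (what is proved, stated in full; the proofs are below) =====
def Claim_equal_action_behavior_flags : Prop := ∀ (action_label : String), Dom_action_behavior_flags action_label → Spec_action_behavior_flags action_label (action_behavior_flags action_label)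

-- ===== LEMMAS AND PROOFS =====

-- the four (dedup'd) name sets of B, spelled out as the literal lists they compute to
theorem pv_allB_eq : pvAllB = ["Flex", "Rage", "Inflame", "Fire Breathing", "Dark Embrace", "Battle Trance",
    "Defend", "Power Through", "Impervious", "Shrug It Off", "Ghostly Armor", "True Grit",
    "Second Wind", "Evolve"] := by decide

theorem pv_cardLikeB_eq : PySem.Set.union (PySem.Set.union pvSetupB pvSurvivalB) pvStatusB
    = ["Flex", "Rage", "Inflame", "Fire Breathing", "Dark Embrace", "Battle Trance",
       "Defend", "Power Through", "Impervious", "Shrug It Off", "Ghostly Armor", "True Grit",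
       "Second Wind", "Evolve"] := by decide

-- B's "matched & S" emptiness test as a single any over the universe list
theorem pv_inter_filter_isEmpty (p : String → Bool) (U S : List String) :
    (PySem.Set.inter (U.filter p) S).isEmpty = !(U.any fun x => p x && S.contains x) := by
  rw [Bool.eq_iff_iff]
  simp [PySem.Set.inter, List.isEmpty_iff, List.filter_eq_nil_iff]
  constructor
  · intro h x hx hpx hxS
    have := h x hx hxS
    simp [hpx] at this
  · intro h a ha haS
    cases hpa : p a with
    | false => rfl
    | true => exact absurd haS (h a ha hpa)

-- ===== VERDICT (by name: the statement is the Claim_ definition above) =====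
theorem action_behavior_flags_spec : Claim_equal_action_behavior_flags := by
  intro action_label _
  unfold Spec_action_behavior_flags action_behavior_flags action_behavior_flags_alt
  simp only [pv_inter_filter_isEmpty, Bool.not_not, pv_allB_eq, pv_cardLikeB_eq,
    List.cons.injEq, Prod.mk.injEq]
  set label := if action_label == "" then "" else action_label with hl
  and_intros <;>
    (first
      | trivial
      | (rw [Bool.eq_iff_iff]
         simp [pvSetupA, pvSurvivalA, pvStatusA, pvDefendB, pvSetupB, pvSurvivalB, pvStatusB,
           PySem.Set.ofList, PySem.Set.union, PySem.Set.add, PySem.Set.update, PySem.Set.empty]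
         try tauto))
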